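-- pv_equiv track=rewrite | github.com/janphilippfranken/typo | experiments/hh_rlhf/train/helpers.py | filter_by_unique_ids
-- ===== SOURCE A (Python) =====
-- from typing import Dict, Sequence, List, Tuple
--
-- def filter_by_unique_ids(
--     prompts: List[str],
--     chosen: List[str],
--     rejected: List[str],
--     example_ids: List[int],
-- ) -> Tuple[List]:
--     filtered_prompts = []
--     filtered_chosen = []
--     filtered_rejected = []
--     seen_ids = set()
--
--     for i, example_id in enumerate(example_ids):
--         if example_id not in seen_ids:
--             seen_ids.add(example_id)
--             filtered_prompts.append(prompts[i])
--             filtered_chosen.append(chosen[i])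
--             filtered_rejected.append(rejected[i])
--
--     return filtered_prompts, filtered_chosen, filtered_rejected
-- ===== SOURCE B (Python) =====
-- def filter_by_unique_ids(prompts, chosen, rejected, example_ids):
--     first_index = {}
--     for i, eid in enumerate(example_ids):
--         first_index.setdefault(eid, i)
--     keep = list(first_index.values())
--     return (
--         [prompts[i] for i in keep],
--         [chosen[i] for i in keep],
--         [rejected[i] for i in keep],
--     )
-- ===== Notes on version B (the rewrite author's own statement) =====
-- stated objective: alternative
-- what changed: Replaces the single interleaved append loop over four accumulators with a two-phase decomposition: first build an insertion-ordered first-occurrence index table with setdefault, then produce each of the three result lists by a separate comprehension indexing into the originals.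
import Mathlib
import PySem

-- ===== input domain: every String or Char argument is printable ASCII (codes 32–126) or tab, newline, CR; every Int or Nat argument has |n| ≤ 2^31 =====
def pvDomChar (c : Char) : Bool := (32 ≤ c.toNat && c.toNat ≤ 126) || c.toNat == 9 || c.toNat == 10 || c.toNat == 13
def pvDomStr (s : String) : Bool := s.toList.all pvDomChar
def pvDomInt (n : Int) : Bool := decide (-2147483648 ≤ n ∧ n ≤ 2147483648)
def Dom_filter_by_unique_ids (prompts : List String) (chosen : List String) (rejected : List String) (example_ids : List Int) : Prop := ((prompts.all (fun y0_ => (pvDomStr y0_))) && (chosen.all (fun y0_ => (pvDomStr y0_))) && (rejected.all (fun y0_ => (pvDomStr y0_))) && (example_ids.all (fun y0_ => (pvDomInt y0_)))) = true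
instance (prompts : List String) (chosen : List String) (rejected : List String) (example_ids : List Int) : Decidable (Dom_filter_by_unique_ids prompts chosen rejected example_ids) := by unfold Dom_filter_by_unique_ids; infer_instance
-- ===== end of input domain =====

-- B replaces A's single interleaved append loop by a two-phase decomposition (build a
-- first-occurrence index table, then select by separate passes); objective: alternative.

-- ===== PORT A =====
-- A's loop: for i, example_id in enumerate(example_ids): if not seen, add to seen and
-- append prompts[i]/chosen[i]/rejected[i]. Indexing prompts[i] is pyGetD (exact under Pre_,
-- which guarantees every accessed index is in range; outside Pre_ Python raises IndexError).
def filter_by_unique_ids (prompts : List String) (chosen : List String) (rejected : List String) (example_ids : List Int) : List String × List String × List String :=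
  let st := (PySem.List.enumerate example_ids).foldl
    (fun (st : List String × List String × List String × PySem.Set Int) p =>
      if PySem.Set.contains st.2.2.2 p.2 then st
      else (st.1 ++ [PySem.List.pyGetD prompts p.1 ""],
            st.2.1 ++ [PySem.List.pyGetD chosen p.1 ""],
            st.2.2.1 ++ [PySem.List.pyGetD rejected p.1 ""],
            PySem.Set.add st.2.2.2 p.2))
    ([], [], [], PySem.Set.empty)
  (st.1, st.2.1, st.2.2.1)

-- ===== PORT B =====
-- phase 1 of Source B: first_index = {}; for i, eid in enumerate(example_ids): first_index.setdefault(eid, i)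
def fbuFirstIndex (example_ids : List Int) : PySem.Dict Int Int :=
  (PySem.List.enumerate example_ids).foldl
    (fun d p => d.setdefault p.2 p.1) PySem.Dict.empty

-- phase 2 of Source B: keep = list(first_index.values()); three comprehensions indexing the originals
def filter_by_unique_ids_alt (prompts : List String) (chosen : List String) (rejected : List String) (example_ids : List Int) : List String × List String × List String :=
  let keep := (fbuFirstIndex example_ids).values
  (keep.map (fun i => PySem.List.pyGetD prompts i ""),
   keep.map (fun i => PySem.List.pyGetD chosen i ""),
   keep.map (fun i => PySem.List.pyGetD rejected i ""))

-- ===== PRECONDITION & SPEC =====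
-- Pre_ excludes exactly the inputs on which Python A raises IndexError: some kept
-- (first-occurrence) position i of example_ids with i out of range for one of the three lists.
def Pre_filter_by_unique_ids (prompts : List String) (chosen : List String) (rejected : List String) (example_ids : List Int) : Prop :=
  ∀ i, (h : i < example_ids.length) → example_ids[i] ∉ example_ids.take i →
    i < prompts.length ∧ i < chosen.length ∧ i < rejected.length
instance (prompts : List String) (chosen : List String) (rejected : List String) (example_ids : List Int) : Decidable (Pre_filter_by_unique_ids prompts chosen rejected example_ids) := by unfold Pre_filter_by_unique_ids; infer_instance

def pvWitness_filter_by_unique_ids : List String × List String × List String × List Int :=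
  (["a", "b", "c"], ["d", "e", "f"], ["g", "h", "i"], [5, 5, 7])

def Spec_filter_by_unique_ids (prompts : List String) (chosen : List String) (rejected : List String) (example_ids : List Int) (out : List String × List String × List String) : Prop := out = filter_by_unique_ids_alt prompts chosen rejected example_ids
instance (prompts : List String) (chosen : List String) (rejected : List String) (example_ids : List Int) (out : List String × List String × List String) : Decidable (Spec_filter_by_unique_ids prompts chosen rejected example_ids out) := by unfold Spec_filter_by_unique_ids; infer_instance

-- ===== CLAIM (what is proved, stated in full; the proofs are below) =====
def Claim_equal_filter_by_unique_ids : Prop := ∀ (prompts : List String) (chosen : List String) (rejected : List String) (example_ids : List Int), Dom_filter_by_unique_ids prompts chosen rejected example_ids → Pre_filter_by_unique_ids prompts chosen rejected example_ids → Spec_filter_by_unique_ids prompts chosen rejected example_ids (filter_by_unique_ids prompts chosen rejected example_ids)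

-- ===== LEMMAS AND PROOFS =====

-- The common step invariant: A's fold starting from the state read off a dict d equals
-- the state read off B's dict-fold result.
theorem fbu_fold_invariant (prompts chosen rejected : List String)
    (l : List Int) : ∀ (s : Int) (d : PySem.Dict Int Int), d.keys.Nodup →
    (PySem.List.enumerate l s).foldl
      (fun (st : List String × List String × List String × PySem.Set Int) p =>
        if PySem.Set.contains st.2.2.2 p.2 then st
        else (st.1 ++ [PySem.List.pyGetD prompts p.1 ""],
              st.2.1 ++ [PySem.List.pyGetD chosen p.1 ""],
              st.2.2.1 ++ [PySem.List.pyGetD rejected p.1 ""],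
              PySem.Set.add st.2.2.2 p.2))
      (d.values.map (fun i => PySem.List.pyGetD prompts i ""),
       d.values.map (fun i => PySem.List.pyGetD chosen i ""),
       d.values.map (fun i => PySem.List.pyGetD rejected i ""),
       d.keys) =
    (let d' := (PySem.List.enumerate l s).foldl (fun d p => d.setdefault p.2 p.1) d
     (d'.values.map (fun i => PySem.List.pyGetD prompts i ""),
      d'.values.map (fun i => PySem.List.pyGetD chosen i ""),
      d'.values.map (fun i => PySem.List.pyGetD rejected i ""),
      d'.keys)) := by
  induction l with
  | nil => intro s d _; simp [PySem.List.enumerate_nil]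
  | cons x xs ih =>
    intro s d hnd
    rw [PySem.List.enumerate_cons]
    simp only [List.foldl_cons]
    by_cases hc : d.contains x = true
    · have hk : x ∈ d.keys := (PySem.Dict.contains_iff_mem_keys d x).mp hc
      rw [if_pos (by simpa [PySem.Set.contains_iff] using hk)]
      rw [PySem.Dict.setdefault_of_contains _ _ hc]
      exact ih (s + 1) d hnd
    · have hc' : d.contains x = false := by simpa using hc
      have hk : x ∉ d.keys := fun h => by
        simp [(PySem.Dict.contains_iff_mem_keys d x).mpr h] at hc'
      rw [if_neg (by simpa [PySem.Set.contains_iff] using hk)]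
      rw [PySem.Dict.setdefault_of_not_contains _ _ hc']
      have hitems := PySem.Dict.items_insert_of_not_contains d s hc'
      have hkeys : (d.insert x s).keys = d.keys ++ [x] := by
        simp [PySem.Dict.keys, hitems]
      have hvals : (d.insert x s).values = d.values ++ [s] := by
        simp [PySem.Dict.values, hitems]
      have hadd : PySem.Set.add d.keys x = d.keys ++ [x] :=
        PySem.Set.add_of_not_mem hk
      have hnd' : (d.insert x s).keys.Nodup := by
        rw [hkeys]
        have hdisj : List.Disjoint d.keys [x] := by
          intro a ha hb
          simp only [List.mem_singleton] at hb
          exact hk (hb ▸ ha)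
        exact hnd.append (List.nodup_singleton x) hdisj
      have := ih (s + 1) (d.insert x s) hnd'
      rw [← this, hkeys, hvals, hadd]
      simp

-- ===== VERDICT (by name: the statement is the Claim_ definition above) =====
theorem filter_by_unique_ids_spec : Claim_equal_filter_by_unique_ids := by
  intro prompts chosen rejected example_ids _ _
  unfold Spec_filter_by_unique_ids filter_by_unique_ids filter_by_unique_ids_alt fbuFirstIndex
  have h := fbu_fold_invariant prompts chosen rejected example_ids 0 PySem.Dict.empty
    (by simp [PySem.Dict.keys, PySem.Dict.empty])
  simp only [PySem.Dict.empty] at h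
  have hk : (PySem.Dict.mk ([] : List (Int × Int))).keys = PySem.Set.empty := rfl
  have hv : (PySem.Dict.mk ([] : List (Int × Int))).values = [] := rfl
  rw [hk, hv] at h
  simp only [List.map_nil] at h
  rw [h]
  rfl
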